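-- pv_equiv track=rewrite | github.com/sixx666voodoo/Technopark_InfoSec-Cracks | CrackMe_4/keygen.py | gen_serial
-- ===== SOURCE A (Python) =====
-- def gen_serial(username):
-- 	log_10 = 0x3
-- 	log_14 = 0x12
-- 	log_15 = 0
-- 	log_16 = 0x7
-- 	log_17 = 0x1f
-- 	eax = 0
-- 	edx = 0
-- 	ecx = 0
--
-- 	for c in username:
-- 		hex_symbol = hex(ord(c))
-- 		eax = int(hex_symbol, 16)
-- 		eax = log_15
-- 		eax = eax + eax
-- 		log_10 = log_10 + eax
-- 		edx = int(hex_symbol, 16)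
-- 		eax = log_10
-- 		edx = edx + eax
-- 		eax = log_16
-- 		eax = eax ^ edx
-- 		log_10 = eax
-- 		eax = log_15
-- 		eax = eax << 0x4
-- 		log_14 = log_14 + eax
-- 		eax = int(hex_symbol, 16)
-- 		edx = log_14
-- 		edx = edx - eax + (0xff + 1 if eax > edx else 0)
-- 		eax = log_17
-- 		eax = eax ^ edx
-- 		log_10 = eax
-- 		log_15 = int(hex_symbol, 16)
--
-- 	eax = log_14
-- 	eax = eax >> 0x1f
-- 	edx = eax
-- 	edx = edx ^ log_14
-- 	edx = edx - eax
-- 	eax = log_10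
-- 	eax = eax >> 0x1f
-- 	ecx = eax
-- 	eax = ecx
-- 	eax = eax ^ log_10
-- 	eax = eax - ecx
--
-- 	return [eax, edx]
-- ===== SOURCE B (Python) =====
-- def gen_serial(username):
--     # Only the last loop iteration determines log_10; log_14 sums lagged ords.
--     log_14 = 0x12 + 16 * sum(ord(c) for c in username[:-1])
--     if username:
--         v = ord(username[-1])
--         log_10 = 0x1f ^ (log_14 - v + (0x100 if v > log_14 else 0))
--     else:
--         log_10 = 0x3
--
--     def final(val):
--         t = val >> 0x1f
--         return (t ^ val) - t
--
--     return [final(log_10), final(log_14)]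
-- ===== Notes on version B (the rewrite author's own statement) =====
-- stated objective: simpler
-- what changed: B drops the loop's dead per-iteration log_10 maintenance entirely: log_14 is a lagged sum 0x12 + 16*sum(ords of username[:-1]) and log_10 is computed in one step from the last character only; the final >>31/xor transform is shared.
import Mathlib
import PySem

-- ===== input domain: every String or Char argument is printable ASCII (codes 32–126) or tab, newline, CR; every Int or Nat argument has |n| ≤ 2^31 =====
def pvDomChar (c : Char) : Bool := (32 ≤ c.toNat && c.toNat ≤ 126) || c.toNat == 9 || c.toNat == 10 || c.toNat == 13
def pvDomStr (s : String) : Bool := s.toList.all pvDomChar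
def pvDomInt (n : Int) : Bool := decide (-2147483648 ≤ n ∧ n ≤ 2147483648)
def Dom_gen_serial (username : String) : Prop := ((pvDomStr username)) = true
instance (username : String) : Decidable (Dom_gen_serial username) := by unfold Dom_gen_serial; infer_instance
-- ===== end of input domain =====

-- B is simpler: the loop's per-iteration log_10 maintenance is dead code (only the
-- last iteration's value survives), so B computes log_14 as a lagged sum and log_10
-- directly from the last character; return value only, no side effects.

-- ===== PORT A =====
-- literal transliteration: the loop carries (log_10, log_14, log_15); each line of
-- register shuffling is folded into the value it assigns, in order, including the
-- overwritten intermediate log_10.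
def gen_serialStep (st : Int × Int × Int) (c : Char) : Int × Int × Int :=
  let o : Int := c.toNat                 -- int(hex(ord(c)), 16) = ord(c)
  let log_10 := st.1 + (st.2.2 + st.2.2)
  let log_10 := PySem.Int.bxor 0x7 (o + log_10)
  let log_14 := st.2.1 + (st.2.2 <<< (4 : Nat))
  let log_10' := PySem.Int.bxor 0x1f (log_14 - o + (if o > log_14 then 0xff + 1 else 0))
  -- the previous log_10 binding is Python's overwritten assignment
  let _ := log_10
  (log_10', log_14, o)

def gen_serial (username : String) : List Int :=
  let st := username.toList.foldl gen_serialStep ((0x3 : Int), (0x12 : Int), (0 : Int))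
  let eax14 := st.2.1 >>> (0x1f : Nat)
  let edx := (PySem.Int.bxor eax14 st.2.1) - eax14
  let ecx := st.1 >>> (0x1f : Nat)
  let eax := (PySem.Int.bxor ecx st.1) - ecx
  [eax, edx]

-- ===== PORT B =====
def gen_serialFinal (val : Int) : Int :=
  let t := val >>> (0x1f : Nat)
  (PySem.Int.bxor t val) - t

def gen_serial_alt (username : String) : List Int :=
  let log_14 : Int := 0x12 + 16 * ((username.toList.dropLast.map (fun c => (c.toNat : Int))).sum)
  let log_10 : Int :=
    if h : username.toList ≠ [] then
      let v : Int := (username.toList.getLast h).toNat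
      PySem.Int.bxor 0x1f (log_14 - v + (if v > log_14 then 0x100 else 0))
    else 0x3
  [gen_serialFinal log_10, gen_serialFinal log_14]

-- ===== PRECONDITION & SPEC =====
def Spec_gen_serial (username : String) (out : List Int) : Prop := out = gen_serial_alt username
instance (username : String) (out : List Int) : Decidable (Spec_gen_serial username out) := by unfold Spec_gen_serial; infer_instance

-- ===== CLAIM (what is proved, stated in full; the proofs are below) =====
def Claim_equal_gen_serial : Prop := ∀ (username : String), Dom_gen_serial username → Spec_gen_serial username (gen_serial username)

-- ===== LEMMAS AND PROOFS =====

theorem int_shl4 (x : Int) : x <<< (4 : Nat) = x * 16 := by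
  rw [Int.shiftLeft_eq]; norm_num

-- Characterisation of A's loop on a nonempty suffix, from an arbitrary state:
-- the returned log_10 depends only on log_14 and the last ord; log_14 sums lagged ords.
theorem gen_serial_loop (l : List Char) (h : l ≠ []) (a m p : Int) :
    l.foldl gen_serialStep (a, m, p) =
      (let M := m + 16 * (p + (l.dropLast.map (fun c => (c.toNat : Int))).sum)
       let v : Int := (l.getLast h).toNat
       (PySem.Int.bxor 0x1f (M - v + (if v > M then 0x100 else 0)), M, v)) := by
  induction l generalizing a m p with
  | nil => exact absurd rfl h
  | cons c tl ih =>
    cases tl with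
    | nil =>
      have hM : m + 16 * (p + ((([c] : List Char).dropLast.map (fun c => (c.toNat : Int))).sum)) = m + p * 16 := by
        simp; ring
      simp only [List.foldl_cons, List.foldl_nil, gen_serialStep, List.getLast]
      rw [hM]
      norm_num [int_shl4]
    | cons c' tl' =>
      rw [List.foldl_cons, ih (by simp)]
      have hd : ((c :: c' :: tl').dropLast.map (fun c => (c.toNat : Int))).sum
          = (c.toNat : Int) + (((c' :: tl').dropLast.map (fun c => (c.toNat : Int))).sum) := by
        simp
      have hl : (c :: c' :: tl').getLast h = (c' :: tl').getLast (by simp) := by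
        simp [List.getLast]
      simp only [gen_serialStep, int_shl4, hd, hl]
      have hM : m + p * 16 + 16 * ((c.toNat : Int) + ((c' :: tl').dropLast.map (fun c => (c.toNat : Int))).sum)
           = m + 16 * (p + ((c.toNat : Int) + ((c' :: tl').dropLast.map (fun c => (c.toNat : Int))).sum)) := by ring
      rw [hM]

-- ===== VERDICT (by name: the statement is the Claim_ definition above) =====
theorem gen_serial_spec : Claim_equal_gen_serial := by
  intro u _
  unfold Spec_gen_serial gen_serial gen_serial_alt
  by_cases h : u.toList = []
  · simp [h, gen_serialFinal]
  · rw [gen_serial_loop u.toList h]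
    simp [h, gen_serialFinal]
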